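-- pv_equiv track=rewrite | github.com/daniil-gorbunov/algo-problems | algo-expert/medium/sort_stack/1.py | recursiveSort
-- ===== SOURCE A (Python) =====
-- def recursiveSort(stack, bottomLevel, currentLevel, minVal):
--     curVal = stack.pop()
--     nextMinVal = min(curVal, minVal)
--     if bottomLevel == currentLevel:
--         stack.append(nextMinVal)
--         return (None, nextMinVal) if curVal == nextMinVal else (curVal, nextMinVal)
--     elevatedVal, totalMin = recursiveSort(stack, bottomLevel, currentLevel + 1, nextMinVal)
--     if elevatedVal is None:
--         stack.append(curVal)
--         return (None, totalMin)
--     elif curVal == totalMin: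
--         stack.append(elevatedVal)
--         return (None, totalMin)
--     stack.append(elevatedVal)
--     return (curVal, totalMin)
-- ===== SOURCE B (Python) =====
-- def recursiveSort(stack, bottomLevel, currentLevel, minVal):
--     # Phase 1: pop the whole segment at once and compute the overall minimum.
--     popped = [stack.pop() for _ in range(bottomLevel - currentLevel + 1)]
--     totalMin = min(min(popped), minVal)
--     # Phase 2: rebuild bottom-up, carrying the value displaced by the minimum.
--     stack.append(totalMin)
--     bottomVal = popped[-1]
--     elevated = None if bottomVal == totalMin else bottomVal
--     for v in reversed(popped[:-1]):
--         if elevated is None: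
--             stack.append(v)
--         elif v == totalMin:
--             stack.append(elevated)
--             elevated = None
--         else:
--             stack.append(elevated)
--             elevated = v
--     return (elevated, totalMin)
-- ===== Notes on version B (the rewrite author's own statement) =====
-- stated objective: alternative
-- what changed: Replaces A's single recursive sweep (pop/recompute-min/push interleaved per recursion level) by an explicit two-phase iteration: pop the whole segment and take its minimum once, then rebuild the stack bottom-up with an 'elevated' accumulator loop; Pre_ excludes inputs where A raises IndexError (segment longer than the stack, or currentLevel > bottomLevel).
import Mathlib
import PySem

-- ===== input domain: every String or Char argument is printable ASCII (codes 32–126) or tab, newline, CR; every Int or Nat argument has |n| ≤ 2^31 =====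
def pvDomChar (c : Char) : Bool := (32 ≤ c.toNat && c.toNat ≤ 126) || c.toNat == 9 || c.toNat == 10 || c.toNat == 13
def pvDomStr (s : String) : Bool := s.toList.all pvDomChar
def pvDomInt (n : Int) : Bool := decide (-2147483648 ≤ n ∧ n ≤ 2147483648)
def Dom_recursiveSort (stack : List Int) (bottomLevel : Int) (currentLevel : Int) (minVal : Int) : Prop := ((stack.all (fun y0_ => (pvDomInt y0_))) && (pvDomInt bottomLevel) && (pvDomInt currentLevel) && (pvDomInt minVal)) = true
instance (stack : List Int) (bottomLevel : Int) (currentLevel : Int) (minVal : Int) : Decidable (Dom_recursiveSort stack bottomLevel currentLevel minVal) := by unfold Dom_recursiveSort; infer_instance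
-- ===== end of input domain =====

-- B replaces A's recursive sweep by a two-phase iteration (pop segment + min, then
-- rebuild bottom-up with an 'elevated' accumulator); both mutate `stack` identically,
-- the equivalence proved here is about the RETURN value.

-- ===== PORT A =====
-- stack.pop() raises IndexError on [] (outside Pre_); the `hne` guard is only that.
def recursiveSort (stack : List Int) (bottomLevel : Int) (currentLevel : Int) (minVal : Int) : Option Int × Int :=
  if hne : stack = [] then (none, minVal)
  else
    let curVal := stack.getLast hne
    let nextMinVal := min curVal minVal
    if bottomLevel = currentLevel then
      if curVal = nextMinVal then (none, nextMinVal) else (some curVal, nextMinVal)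
    else
      let r := recursiveSort stack.dropLast bottomLevel (currentLevel + 1) nextMinVal
      match r.1 with
      | none => (none, r.2)
      | some _ => if curVal = r.2 then (none, r.2) else (some curVal, r.2)
termination_by stack.length
decreasing_by
  simpa [List.length_dropLast] using Nat.sub_lt (List.length_pos_of_ne_nil hne) Nat.one_pos

-- ===== PORT B =====
-- `[stack.pop() for _ in range(n)]`: pops the last element n times (stops where Python
-- would raise IndexError; that case is outside Pre_). Returns (remaining, popped).
def pvPopN : List Int → Nat → List Int × List Int
  | st, 0 => (st, [])
  | st, n + 1 =>
      match st.getLast? with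
      | none => (st, [])
      | some x =>
          let r := pvPopN st.dropLast n
          (r.1, x :: r.2)

-- the `for v in reversed(popped[:-1])` loop: only the `elevated` state affects the return
def pvPushLoop : List Int → Option Int → Int → Option Int
  | [], e, _ => e
  | v :: rest, e, tm =>
      match e with
      | none => pvPushLoop rest none tm
      | some _ => if v = tm then pvPushLoop rest none tm else pvPushLoop rest (some v) tm

def recursiveSort_alt (stack : List Int) (bottomLevel : Int) (currentLevel : Int) (minVal : Int) : Option Int × Int :=
  let popped := (pvPopN stack (bottomLevel - currentLevel + 1).toNat).2
  match PySem.List.min? popped (fun x => x) with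
  | none => (none, minVal)   -- min([]) raises ValueError in Python (outside Pre_)
  | some pm =>
      let totalMin := min pm minVal
      let bottomVal := popped.getLast!
      let e0 : Option Int := if bottomVal = totalMin then none else some bottomVal
      (pvPushLoop popped.dropLast.reverse e0 totalMin, totalMin)

-- ===== PRECONDITION & SPEC =====
-- Pre_ excludes exactly the inputs where Python A raises IndexError: the recursion pops
-- bottomLevel - currentLevel + 1 elements, so it needs currentLevel ≤ bottomLevel and a
-- stack at least that long.
def Pre_recursiveSort (stack : List Int) (bottomLevel : Int) (currentLevel : Int) (minVal : Int) : Prop :=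
  currentLevel ≤ bottomLevel ∧ bottomLevel - currentLevel + 1 ≤ (stack.length : Int)
instance (stack : List Int) (bottomLevel : Int) (currentLevel : Int) (minVal : Int) : Decidable (Pre_recursiveSort stack bottomLevel currentLevel minVal) := by unfold Pre_recursiveSort; infer_instance
def pvWitness_recursiveSort : List Int × Int × Int × Int := ([3, 1, 2], 2, 0, 10)

def Spec_recursiveSort (stack : List Int) (bottomLevel : Int) (currentLevel : Int) (minVal : Int) (out : Option Int × Int) : Prop := out = recursiveSort_alt stack bottomLevel currentLevel minVal
instance (stack : List Int) (bottomLevel : Int) (currentLevel : Int) (minVal : Int) (out : Option Int × Int) : Decidable (Spec_recursiveSort stack bottomLevel currentLevel minVal out) := by unfold Spec_recursiveSort; infer_instance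

-- ===== CLAIM (what is proved, stated in full; the proofs are below) =====
def Claim_equal_recursiveSort : Prop := ∀ (stack : List Int) (bottomLevel : Int) (currentLevel : Int) (minVal : Int), Dom_recursiveSort stack bottomLevel currentLevel minVal → Pre_recursiveSort stack bottomLevel currentLevel minVal → Spec_recursiveSort stack bottomLevel currentLevel minVal (recursiveSort stack bottomLevel currentLevel minVal)

-- ===== LEMMAS AND PROOFS =====

lemma pvDropConcat (l : List Int) (x : Int) (k : Nat) :
    (l ++ [x]).drop ((l ++ [x]).length - (k + 1)) = l.drop (l.length - k) ++ [x] := by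
  have hlen : (l ++ [x]).length - (k + 1) = l.length - k := by simp
  rw [List.drop_append_of_le_length (by simp), hlen]

-- common closed form both ports compute on the popped segment (in stack order:
-- head = deepest popped element, last = top of stack)
def pvCf : List Int → Int → Option Int × Int
  | [], mv => (none, mv)
  | x :: t, mv =>
      let m := t.foldl min x
      (if m ≤ mv then none else (x :: t).getLast?, min m mv)

lemma pvCf_cons (x : Int) (t : List Int) (mv : Int) :
    pvCf (x :: t) mv =
      (if t.foldl min x ≤ mv then none else (x :: t).getLast?, min (t.foldl min x) mv) := rfl

lemma pvGetLastConcat (l : List Int) (x : Int) : (l ++ [x]).getLast! = x := by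
  cases l with
  | nil => rfl
  | cons a as =>
      rw [List.cons_append, List.getLast!.eq_def]
      simp only []
      rw [List.getLast_eq_iff_getLast?_eq_some, ← List.cons_append]
      exact List.getLast?_concat

lemma pvAEqCf (n : Nat) : ∀ (stack : List Int) (b c mv : Int),
    b - c = (n : Int) → n + 1 ≤ stack.length →
    recursiveSort stack b c mv = pvCf (stack.drop (stack.length - (n + 1))) mv := by
  induction n with
  | zero =>
      intro stack b c mv hbc hlen
      have hne : stack ≠ [] := by intro hn; simp [hn] at hlen
      have hsplit : stack.dropLast ++ [stack.getLast hne] = stack := List.dropLast_append_getLast hne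
      have hlapp : (stack.dropLast ++ [stack.getLast hne]).length = stack.length := by rw [hsplit]
      have hdrop : stack.drop (stack.length - 1) = [stack.getLast hne] := by
        have h0 := pvDropConcat stack.dropLast (stack.getLast hne) 0
        simp only [Nat.sub_zero, List.drop_length, List.nil_append] at h0
        rw [hlapp, hsplit] at h0
        exact h0
      have hbceq : b = c := by omega
      rw [recursiveSort, dif_neg hne]
      simp only [hbceq, hdrop, pvCf_cons]
      rw [if_pos trivial]
      simp only [List.foldl_nil]
      by_cases hle : stack.getLast hne ≤ mv
      · rw [if_pos (show stack.getLast hne = min (stack.getLast hne) mv by omega),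
            if_pos hle]
      · rw [if_neg (show ¬ stack.getLast hne = min (stack.getLast hne) mv by omega),
            if_neg hle]
        simp
  | succ n ih =>
      intro stack b c mv hbc hlen
      have hne : stack ≠ [] := by intro hn; simp [hn] at hlen
      have hsplit : stack.dropLast ++ [stack.getLast hne] = stack := List.dropLast_append_getLast hne
      have hdl : stack.dropLast.length = stack.length - 1 := List.length_dropLast
      have hlapp : (stack.dropLast ++ [stack.getLast hne]).length = stack.length := by rw [hsplit]
      have hih := ih stack.dropLast b (c + 1) (min (stack.getLast hne) mv)
        (by omega) (by omega)
      have hseg : stack.drop (stack.length - (n + 1 + 1)) =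
          stack.dropLast.drop (stack.dropLast.length - (n + 1)) ++ [stack.getLast hne] := by
        have h0 := pvDropConcat stack.dropLast (stack.getLast hne) (n + 1)
        rw [hlapp, hsplit] at h0
        exact h0
      rw [recursiveSort, dif_neg hne]
      simp only [if_neg (show ¬ b = c by omega), hih, hseg]
      cases hv : stack.dropLast.drop (stack.dropLast.length - (n + 1)) with
      | nil =>
          exfalso
          have := congrArg List.length hv
          simp [List.length_drop] at this
          omega
      | cons x t =>
          simp only [List.cons_append, pvCf_cons, List.foldl_cons, List.foldl_append, List.foldl_nil]
          by_cases h1 : t.foldl min x ≤ min (stack.getLast hne) mv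
          · simp only [if_pos h1]
            rw [if_pos (show min (t.foldl min x) (stack.getLast hne) ≤ mv by omega)]
            simp only [Prod.mk.injEq]
            exact ⟨trivial, by omega⟩
          · simp only [if_neg h1]
            have hy : (x :: t).getLast? = some ((x :: t).getLast (by simp)) :=
              List.getLast?_eq_some_getLast _
            rw [hy]
            by_cases h2 : stack.getLast hne = min (t.foldl min x) (min (stack.getLast hne) mv)
            · rw [if_pos h2, if_pos (show min (t.foldl min x) (stack.getLast hne) ≤ mv by omega)]
              simp only [Prod.mk.injEq]
              exact ⟨trivial, by omega⟩
            · rw [if_neg h2, if_neg (show ¬ min (t.foldl min x) (stack.getLast hne) ≤ mv by omega)]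
              have hgl : (x :: (t ++ [stack.getLast hne])).getLast? = some (stack.getLast hne) := by
                rw [← List.cons_append]
                exact List.getLast?_concat
              rw [hgl]
              simp only [Prod.mk.injEq]
              exact ⟨trivial, by omega⟩

-- ---- B-side lemmas ----

lemma pvPopN_eq (k : Nat) : ∀ (stack : List Int), k ≤ stack.length →
    pvPopN stack k = (stack.take (stack.length - k), (stack.drop (stack.length - k)).reverse) := by
  induction k with
  | zero => intro stack _; simp [pvPopN]
  | succ n ih =>
      intro stack hk
      have hne : stack ≠ [] := by intro hn; simp [hn] at hk
      have hgl : stack.getLast? = some (stack.getLast hne) := List.getLast?_eq_some_getLast hne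
      have hdl : stack.dropLast.length = stack.length - 1 := List.length_dropLast
      have hih := ih stack.dropLast (by omega)
      rw [pvPopN]
      simp only [hih]
      have hsplit : stack.dropLast ++ [stack.getLast hne] = stack := List.dropLast_append_getLast hne
      have hlapp : (stack.dropLast ++ [stack.getLast hne]).length = stack.length := by rw [hsplit]
      have hdrop : stack.drop (stack.length - (n + 1)) =
          stack.dropLast.drop (stack.dropLast.length - n) ++ [stack.getLast hne] := by
        have h0 := pvDropConcat stack.dropLast (stack.getLast hne) n
        rw [hlapp, hsplit] at h0
        exact h0
      have htake : stack.take (stack.length - (n + 1)) =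
          stack.dropLast.take (stack.dropLast.length - n) := by
        conv_lhs => rw [← hsplit]
        rw [List.take_append_of_le_length (by omega)]
        congr 1
        omega
      rw [hdrop, htake]
      split
      · simp_all
      · rename_i x hx
        rw [hgl] at hx
        cases hx
        simp

lemma pvPushLoop_none (t : List Int) (tm : Int) : pvPushLoop t none tm = none := by
  induction t with
  | nil => rfl
  | cons v rest ih => rw [pvPushLoop]; exact ih

lemma pvPushLoop_notmem (t : List Int) : ∀ (v0 tm : Int), tm ∉ t →
    pvPushLoop t (some v0) tm = some ((v0 :: t).getLast (by simp)) := by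
  induction t with
  | nil => intro v0 tm _; rfl
  | cons v rest ih =>
      intro v0 tm hmem
      rw [pvPushLoop]
      have hv : v ≠ tm := fun h => hmem (by simp [h])
      rw [if_neg hv, ih v tm (fun h => hmem (by simp [h]))]
      simp

lemma pvPushLoop_mem (t : List Int) : ∀ (v0 tm : Int), tm ∈ t →
    pvPushLoop t (some v0) tm = none := by
  induction t with
  | nil => intro v0 tm h; cases h
  | cons v rest ih =>
      intro v0 tm hmem
      rw [pvPushLoop]
      by_cases hv : v = tm
      · rw [if_pos hv, pvPushLoop_none]
      · rw [if_neg hv]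
        exact ih v tm (by cases hmem with
          | head => exact absurd rfl hv
          | tail _ h => exact h)

lemma pvFoldlMin_mem (t : List Int) : ∀ (x : Int), t.foldl min x ∈ x :: t := by
  induction t with
  | nil => intro x; simp
  | cons v rest ih =>
      intro x
      have := ih (min x v)
      rcases List.mem_cons.mp this with h | h
      · by_cases hle : x ≤ v
        · simp only [List.foldl_cons]
          rw [h, min_eq_left hle]
          simp
        · simp only [List.foldl_cons]
          rw [h, min_eq_right (by omega)]
          simp
      · simp only [List.foldl_cons]; right; right; exact h

lemma pvFoldlMin_le (t : List Int) : ∀ (x y : Int), y ∈ x :: t → t.foldl min x ≤ y := by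
  induction t with
  | nil => intro x y h; simp at h ⊢; omega
  | cons v rest ih =>
      intro x y h
      simp only [List.foldl_cons]
      rcases List.mem_cons.mp h with h1 | h1
      · have := ih (min x v) (min x v) (by simp)
        subst h1; exact le_trans this (min_le_left _ _)
      · rcases List.mem_cons.mp h1 with h2 | h2
        · have := ih (min x v) (min x v) (by simp)
          subst h2; exact le_trans this (min_le_right _ _)
        · exact ih (min x v) y (by simp [h2])

lemma pvAltEqCf (stack : List Int) (b c mv : Int) (n : Nat)
    (hbc : b - c = (n : Int)) (hlen : n + 1 ≤ stack.length) :
    recursiveSort_alt stack b c mv = pvCf (stack.drop (stack.length - (n + 1))) mv := by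
  have hk : (b - c + 1).toNat = n + 1 := by omega
  simp only [recursiveSort_alt, hk]
  rw [pvPopN_eq (n + 1) stack hlen]
  cases hv : stack.drop (stack.length - (n + 1)) with
  | nil =>
      exfalso
      have := congrArg List.length hv
      simp [List.length_drop] at this
      omega
  | cons x t =>
      have hrev : (x :: t).reverse = t.reverse ++ [x] := by simp
      -- the minimum Python's min() returns over the popped list equals t.foldl min x
      set m := t.foldl min x with hm
      obtain ⟨pm, hpm⟩ : ∃ pm, PySem.List.min? ((x :: t).reverse) (fun y => y) = some pm := by
        cases hq : PySem.List.min? ((x :: t).reverse) (fun y => y) with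
        | none =>
            exfalso
            have := (PySem.List.min?_eq_none_iff _ _).mp hq
            simp at this
        | some pm => exact ⟨pm, rfl⟩
      have hpm_mem : pm ∈ x :: t := by
        have := PySem.List.min?_mem hpm
        rwa [List.mem_reverse] at this
      have hpm_le : ∀ y ∈ x :: t, pm ≤ y := by
        intro y hy
        exact PySem.List.min?_isMin hpm y (List.mem_reverse.mpr hy)
      have hpm_eq : pm = m := by
        have h1 : m ≤ pm := pvFoldlMin_le t x pm hpm_mem
        have h2 : pm ≤ m := hpm_le m (pvFoldlMin_mem t x)
        omega
      -- bottomVal = x, and the loop walks t (just above the bottom, upward)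
      have hbot : ((x :: t).reverse).getLast! = x := by
        rw [hrev]; exact pvGetLastConcat _ _
      have hwalk : ((x :: t).reverse).dropLast.reverse = t := by
        rw [hrev, List.dropLast_concat, List.reverse_reverse]
      simp only [hpm, hpm_eq, hbot, hwalk, pvCf_cons]
      by_cases hcase : m ≤ mv
      · -- totalMin = m, which occurs in x :: t: the loop ends with elevated = None
        have htm : min m mv = m := by omega
        simp only [htm]
        rw [if_pos hcase]
        rcases List.mem_cons.mp (pvFoldlMin_mem t x) with hx | hx
        · rw [if_pos hx.symm, pvPushLoop_none, ← hm, htm]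
        · by_cases hxeq : x = m
          · rw [if_pos hxeq, pvPushLoop_none, ← hm, htm]
          · rw [if_neg hxeq, pvPushLoop_mem t x m hx, ← hm, htm]
      · -- totalMin = mv < every popped value: elevated tracks the last pushed value = top
        have htm : min m mv = mv := by omega
        simp only [htm]
        rw [if_neg hcase]
        have hxne : ¬ x = mv := by
          have := pvFoldlMin_le t x x (by simp)
          omega
        have hnmem : mv ∉ t := by
          intro hmem
          have := pvFoldlMin_le t x mv (by simp [hmem])
          omega
        rw [if_neg hxne, pvPushLoop_notmem t x mv hnmem]
        rw [List.getLast?_eq_some_getLast (l := x :: t) (by simp), ← hm, htm]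

-- ===== VERDICT (by name: the statement is the Claim_ definition above) =====
theorem recursiveSort_spec : Claim_equal_recursiveSort := by
  intro stack b c mv _ hpre
  obtain ⟨h1, h2⟩ := hpre
  unfold Spec_recursiveSort
  have hn : b - c = ((b - c).toNat : Int) := by omega
  have hlen : (b - c).toNat + 1 ≤ stack.length := by omega
  rw [pvAEqCf (b - c).toNat stack b c mv hn hlen,
      pvAltEqCf stack b c mv (b - c).toNat hn hlen]
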